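-- pv_equiv track=rewrite | github.com/miliar/Code_Jam_Webscraper | solutions_python/solutions_year16_round0_nr2/2249.py | flip
-- ===== SOURCE A (Python) =====
-- def flip(pancakes):
--     result = []
--     for idx, c in enumerate(pancakes):
--         if c == 0:
--             result.append(1)
--         else:
--             result += pancakes[idx:]
--             break
--     return result
-- ===== SOURCE B (Python) =====
-- def flip(pancakes):
--     # Stateful pointwise transform (a scan): no break, no slicing, no suffix
--     # append.  Each element is rewritten on its own: it becomes 1 exactly while
--     # the running "every element so far was zero" flag is still true.
--     out = []
--     lead = True
--     for c in pancakes: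
--         lead = lead and c == 0
--         out.append(1 if lead else c)
--     return out
-- ===== Notes on version B (the rewrite author's own statement) =====
-- stated objective: alternative
-- what changed: Replaces A's replace-until-break-then-splice-the-suffix loop by a pointwise scan: a running all-zeros-so-far flag is threaded through every element and each element is mapped independently (1 while the flag holds, itself afterwards); no break, no slice, no suffix append.
import Mathlib
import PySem

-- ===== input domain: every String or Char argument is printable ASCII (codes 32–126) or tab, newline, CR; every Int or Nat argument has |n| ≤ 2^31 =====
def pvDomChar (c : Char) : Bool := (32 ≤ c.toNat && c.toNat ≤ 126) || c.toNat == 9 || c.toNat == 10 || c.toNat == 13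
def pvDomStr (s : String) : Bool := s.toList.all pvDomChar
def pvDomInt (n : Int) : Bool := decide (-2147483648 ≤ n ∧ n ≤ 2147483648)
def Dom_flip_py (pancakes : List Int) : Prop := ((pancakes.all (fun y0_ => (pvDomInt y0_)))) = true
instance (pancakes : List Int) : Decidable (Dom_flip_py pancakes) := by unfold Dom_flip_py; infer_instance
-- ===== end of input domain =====

-- B replaces A's replace-until-break-then-splice loop by a pointwise scan with a
-- running all-zeros-so-far flag (alternative decomposition; same cost).

-- ===== PORT A =====
-- A's loop: walks enumerate(pancakes); on 0 appends 1, on the first non-zero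
-- appends the slice pancakes[idx:] and breaks.
def flipA_go (pancakes : List Int) (idx : Nat) (rest : List Int) (result : List Int) : List Int :=
  match rest with
  | [] => result
  | c :: cs =>
      if c == 0 then flipA_go pancakes (idx + 1) cs (result ++ [1])
      else result ++ PySem.List.slice pancakes (some (idx : Int)) none

def flip_py (pancakes : List Int) : List Int :=
  flipA_go pancakes 0 pancakes []

-- ===== PORT B =====
-- scan: state (lead, out); lead = lead && c == 0; append (1 if lead else c).
def flipB_step (s : Bool × List Int) (c : Int) : Bool × List Int :=
  let lead := s.1 && (c == 0)
  (lead, s.2 ++ [if lead then 1 else c])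

def flip_py_alt (pancakes : List Int) : List Int :=
  (pancakes.foldl flipB_step (true, [])).2

-- ===== PRECONDITION & SPEC =====
def Spec_flip_py (pancakes : List Int) (out : List Int) : Prop := out = flip_py_alt pancakes
instance (pancakes : List Int) (out : List Int) : Decidable (Spec_flip_py pancakes out) := by unfold Spec_flip_py; infer_instance

-- ===== CLAIM (what is proved, stated in full; the proofs are below) =====
def Claim_equal_flip_py : Prop := ∀ (pancakes : List Int), Dom_flip_py pancakes → Spec_flip_py pancakes (flip_py pancakes)

-- ===== LEMMAS AND PROOFS =====

-- once the flag is false, B's fold just copies the rest of the list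
theorem flipB_fold_false (rest : List Int) : ∀ (out : List Int),
    rest.foldl flipB_step (false, out) = (false, out ++ rest) := by
  induction rest with
  | nil => intro out; simp
  | cons c cs ih =>
      intro out
      simp only [List.foldl_cons, flipB_step, Bool.false_and]
      rw [ih]
      simp

-- loop invariant: with rest = pancakes.drop idx, A's loop equals B's fold
-- started with flag true and accumulator result
theorem flipA_go_eq (pancakes : List Int) :
    ∀ (rest : List Int) (idx : Nat) (result : List Int),
      pancakes.drop idx = rest →
      flipA_go pancakes idx rest result = (rest.foldl flipB_step (true, result)).2 := by
  intro rest
  induction rest with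
  | nil => intro idx result h; simp [flipA_go]
  | cons c cs ih =>
      intro idx result h
      by_cases hc : c = 0
      · have hdrop : pancakes.drop (idx + 1) = cs := by
          have := congrArg List.tail h
          simpa [List.tail_drop] using this
        simp only [flipA_go, hc]
        rw [ih (idx + 1) (result ++ [1]) hdrop]
        simp [List.foldl_cons, flipB_step, hc]
      · have hcb : (c == (0 : Int)) = false := by simp [hc]
        simp only [flipA_go, hcb]
        simp only [if_false, Bool.false_eq_true]
        rw [PySem.List.slice_from_natCast, h]
        simp [List.foldl_cons, flipB_step, hcb, flipB_fold_false]

-- ===== VERDICT (by name: the statement is the Claim_ definition above) =====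
theorem flip_py_spec : Claim_equal_flip_py := by
  intro pancakes _
  unfold Spec_flip_py flip_py flip_py_alt
  exact flipA_go_eq pancakes pancakes 0 [] (by simp)
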